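-- pv_equiv track=rewrite | github.com/daedalus/libciphers | src/libciphers/__init__.py | quagmire_decrypt
-- ===== SOURCE A (Python) =====
-- import string
--
-- A = string.ascii_uppercase
--
-- def let2n(c):
--     """Letter to number (A=0, B=1, ..., Z=25)"""
--     return ord(c.upper()) - 65 if c.upper() in A else -1
--
-- def clean_text(text):
--     """Remove non-alphabetic characters and uppercase."""
--     return "".join(c.upper() for c in text if c in A)
--
-- def keyed_alphabet(keyword):
--     """Create alphabet from keyword"""
--     seen, result = set(), []
--     for c in keyword.upper():
--         if c in A and c not in seen:
--             result.append(c)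
--             seen.add(c)
--     for c in A:
--         if c not in seen:
--             result.append(c)
--     return "".join(result)
--
-- def quagmire_decrypt(ciphertext, key, indicator, period):
--     """Quagmire decryption"""
--     key_alpha = keyed_alphabet(key)
--     ind_alpha = keyed_alphabet(indicator)
--     ciphertext = clean_text(ciphertext)
--
--     result = []
--     for i, c in enumerate(ciphertext):
--         ct_idx = let2n(c)
--         k_idx = let2n(ind_alpha[i % period])
--         pt_idx = (ct_idx - k_idx) % 26
--         result.append(key_alpha[pt_idx])
--     return "".join(result)
-- ===== SOURCE B (Python) =====
-- import string
--
-- A = string.ascii_uppercase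
--
-- def let2n(c):
--     """Letter to number by alphabet position (A=0..Z=25, -1 if not a letter)."""
--     return A.find(c.upper())
--
-- def clean_text(text):
--     """Keep only the uppercase alphabetic characters."""
--     return "".join(c for c in text if c in A)
--
-- def keyed_alphabet(keyword):
--     """One dedup pass over keyword letters followed by the full alphabet."""
--     out = []
--     for c in keyword.upper() + A:
--         if c in A and c not in out:
--             out.append(c)
--     return "".join(out)
--
-- def quagmire_decrypt(ciphertext, key, indicator, period):
--     """Quagmire decryption, built column by column (one shift per key phase)."""
--     key_alpha = keyed_alphabet(key)
--     ind_alpha = keyed_alphabet(indicator)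
--     ct = clean_text(ciphertext)
--     n = len(ct)
--     out = [None] * n
--     for j in range(min(period, n)):
--         s = let2n(ind_alpha[j])
--         for i in range(j, n, period):
--             out[i] = key_alpha[(let2n(ct[i]) - s) % 26]
--     return "".join(out)
-- ===== Notes on version B (the rewrite author's own statement) =====
-- stated objective: alternative
-- what changed: B decrypts column-by-column: it computes one indicator shift per key phase and scatters decrypted letters into a preallocated buffer at their original positions (instead of A's single left-to-right pass that re-indexes the indicator alphabet by i % period for every character); the helpers dedup the keyed alphabet in one pass over keyword+alphabet and map letters to numbers by alphabet position lookup.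
-- outside the precondition, e.g. on quagmire_decrypt('AB', 'K', 'I', -2): A returns 'SB', B raises TypeError; on quagmire_decrypt('X', 'K', 'I', -1000): A returns 'P', B raises TypeError
import Mathlib
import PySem

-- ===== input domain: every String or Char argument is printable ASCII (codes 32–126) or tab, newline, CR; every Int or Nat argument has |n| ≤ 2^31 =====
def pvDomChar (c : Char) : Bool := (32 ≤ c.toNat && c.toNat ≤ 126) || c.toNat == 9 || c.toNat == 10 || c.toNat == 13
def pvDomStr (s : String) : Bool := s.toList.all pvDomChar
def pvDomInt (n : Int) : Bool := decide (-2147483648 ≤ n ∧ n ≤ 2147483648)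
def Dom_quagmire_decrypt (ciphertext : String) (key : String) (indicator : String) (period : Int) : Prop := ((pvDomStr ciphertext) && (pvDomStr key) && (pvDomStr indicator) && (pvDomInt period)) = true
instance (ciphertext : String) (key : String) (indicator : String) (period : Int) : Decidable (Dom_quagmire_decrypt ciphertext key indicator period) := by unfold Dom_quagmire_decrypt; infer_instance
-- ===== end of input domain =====

-- B rebuilds the plaintext column-by-column (one indicator shift per key phase, scattered into a
-- preallocated buffer) instead of A's single left-to-right pass; an alternative of the same cost.

set_option maxRecDepth 10000

-- ===== PORT A =====
def pvAlpha : List Char :=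
  ['A','B','C','D','E','F','G','H','I','J','K','L','M',
   'N','O','P','Q','R','S','T','U','V','W','X','Y','Z']

def pvLet2n (c : Char) : Int :=
  if PySem.Chars.upperChar c ∈ pvAlpha then ((PySem.Chars.upperChar c).toNat : Int) - 65 else -1

def pvCleanText (text : List Char) : List Char :=
  (text.filter (fun c => decide (c ∈ pvAlpha))).map PySem.Chars.upperChar

def pvKeyedAlphabet (keyword : List Char) : List Char :=
  let st := (PySem.Chars.upper keyword).foldl
    (fun (acc : PySem.Set Char × List Char) c =>
      if c ∈ pvAlpha ∧ c ∉ acc.1 then (PySem.Set.add acc.1 c, acc.2 ++ [c]) else acc)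
    ((PySem.Set.empty : PySem.Set Char), ([] : List Char))
  pvAlpha.foldl (fun r c => if c ∉ st.1 then r ++ [c] else r) st.2

def quagmire_decrypt (ciphertext : String) (key : String) (indicator : String) (period : Int) : String :=
  let key_alpha := pvKeyedAlphabet key.toList
  let ind_alpha := pvKeyedAlphabet indicator.toList
  let ct := pvCleanText ciphertext.toList
  let result := (PySem.List.enumerate ct).foldl
    (fun (res : List Char) (pr : Int × Char) =>
      let ct_idx := pvLet2n pr.2
      let k_idx := pvLet2n (PySem.List.pyGetD ind_alpha (PySem.Int.mod pr.1 period) 'A')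
      let pt_idx := PySem.Int.mod (ct_idx - k_idx) 26
      res ++ [PySem.List.pyGetD key_alpha pt_idx 'A'])
    []
  String.mk result

-- ===== PORT B =====
def pvLet2nB (c : Char) : Int := PySem.Chars.find pvAlpha [PySem.Chars.upperChar c]

def pvCleanTextB (text : List Char) : List Char :=
  text.filter (fun c => decide (c ∈ pvAlpha))

def pvKeyedAlphabetB (keyword : List Char) : List Char :=
  (PySem.Chars.upper keyword ++ pvAlpha).foldl
    (fun out c => if c ∈ pvAlpha ∧ c ∉ out then out ++ [c] else out) []

def quagmire_decrypt_alt (ciphertext : String) (key : String) (indicator : String) (period : Int) : String :=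
  let key_alpha := pvKeyedAlphabetB key.toList
  let ind_alpha := pvKeyedAlphabetB indicator.toList
  let ct := pvCleanTextB ciphertext.toList
  let n : Int := (ct.length : Int)
  let init : List (Option Char) := List.replicate ct.length none
  let filled := (PySem.List.pyRange 0 (min period n)).foldl
    (fun out j =>
      let s := pvLet2nB (PySem.List.pyGetD ind_alpha j 'A')
      (PySem.List.pyRange j n period).foldl
        (fun out i =>
          out.set i.toNat (some (PySem.List.pyGetD key_alpha
            (PySem.Int.mod (pvLet2nB (PySem.List.pyGetD ct i 'A') - s) 26) 'A')))
        out)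
    init
  String.mk (filled.map (fun o => o.getD 'A'))

-- ===== PRECONDITION & SPEC =====
-- Pre_ excludes exactly: inputs where A raises (period 0, or period > 26 with more than 26 letters
-- of ciphertext: ZeroDivisionError / IndexError), and negative periods with a nonempty letter
-- ciphertext, where A's value comes from Python negative-index wraparound into the indicator
-- alphabet (an accident of indexing) and B's buffer is never filled, so its join raises TypeError.
def Pre_quagmire_decrypt (ciphertext : String) (key : String) (indicator : String) (period : Int) : Prop :=
  (ciphertext.toList.filter (fun c => decide (c ∈ pvAlpha))) = [] ∨
  (1 ≤ period ∧ (period ≤ 26 ∨ (ciphertext.toList.filter (fun c => decide (c ∈ pvAlpha))).length ≤ 26))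

instance (ciphertext : String) (key : String) (indicator : String) (period : Int) : Decidable (Pre_quagmire_decrypt ciphertext key indicator period) := by
  unfold Pre_quagmire_decrypt; infer_instance

def pvWitness_quagmire_decrypt : String × String × String × Int := ("HELLO", "KEY", "IND", 5)

def Spec_quagmire_decrypt (ciphertext : String) (key : String) (indicator : String) (period : Int) (out : String) : Prop := out = quagmire_decrypt_alt ciphertext key indicator period
instance (ciphertext : String) (key : String) (indicator : String) (period : Int) (out : String) : Decidable (Spec_quagmire_decrypt ciphertext key indicator period out) := by unfold Spec_quagmire_decrypt; infer_instance

-- ===== CLAIM (what is proved, stated in full; the proofs are below) =====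
def Claim_equal_quagmire_decrypt : Prop := ∀ (ciphertext : String) (key : String) (indicator : String) (period : Int), Dom_quagmire_decrypt ciphertext key indicator period → Pre_quagmire_decrypt ciphertext key indicator period → Spec_quagmire_decrypt ciphertext key indicator period (quagmire_decrypt ciphertext key indicator period)

-- ===== LEMMAS AND PROOFS =====

lemma pvUpper_id : ∀ c ∈ pvAlpha, PySem.Chars.upperChar c = c := by
  have h : (pvAlpha.all (fun c => PySem.Chars.upperChar c == c)) = true := by rfl
  intro c hc
  exact eq_of_beq (List.all_eq_true.mp h c hc)

lemma pvFind_mem : ∀ c ∈ pvAlpha, PySem.Chars.find pvAlpha [c] = ((c.toNat : Int) - 65) := by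
  have h : (pvAlpha.all (fun c => PySem.Chars.find pvAlpha [c] == ((c.toNat : Int) - 65))) = true := by rfl
  intro c hc
  exact eq_of_beq (List.all_eq_true.mp h c hc)

lemma pvSingleton_infix {u : Char} {l : List Char} : [u] <:+: l ↔ u ∈ l := by
  constructor
  · intro h; exact List.singleton_sublist.mp h.sublist
  · intro h
    obtain ⟨s, t, rfl⟩ := List.mem_iff_append.mp h
    exact ⟨s, t, by simp⟩

lemma pvLet2n_eq (c : Char) : pvLet2n c = pvLet2nB c := by
  unfold pvLet2n pvLet2nB
  by_cases h : PySem.Chars.upperChar c ∈ pvAlpha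
  · rw [if_pos h, pvFind_mem _ h]
  · rw [if_neg h, eq_comm, PySem.Chars.find_eq_neg_one_iff, pvSingleton_infix]
    exact h

lemma pvClean_eq (t : List Char) : pvCleanText t = pvCleanTextB t := by
  unfold pvCleanText pvCleanTextB
  have h : ∀ c ∈ t.filter (fun c => decide (c ∈ pvAlpha)), PySem.Chars.upperChar c = c := by
    intro c hc
    exact pvUpper_id c (by simpa using (List.mem_filter.mp hc).2)
  rw [List.map_congr_left h]
  simp

def pvStep (out : List Char) (c : Char) : List Char :=
  if c ∈ pvAlpha ∧ c ∉ out then out ++ [c] else out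

lemma pvKeyed_loop1 (l : List Char) (r : List Char) :
    l.foldl
      (fun (acc : PySem.Set Char × List Char) c =>
        if c ∈ pvAlpha ∧ c ∉ acc.1 then (PySem.Set.add acc.1 c, acc.2 ++ [c]) else acc)
      (r, r)
    = (l.foldl pvStep r, l.foldl pvStep r) := by
  induction l generalizing r with
  | nil => rfl
  | cons c l ih =>
    simp only [List.foldl_cons]
    by_cases hc : c ∈ pvAlpha ∧ c ∉ r
    · rw [if_pos hc, PySem.Set.add_of_not_mem hc.2]
      have hstep : pvStep r c = r ++ [c] := by unfold pvStep; rw [if_pos hc]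
      rw [hstep]; exact ih (r ++ [c])
    · rw [if_neg hc]
      have hstep : pvStep r c = r := by unfold pvStep; rw [if_neg hc]
      rw [hstep]; exact ih r

lemma pvKeyed_loop2 (l : List Char) (r1 : List Char) :
    ∀ (extra : List Char), l.Nodup → (∀ c ∈ l, c ∈ pvAlpha) → (∀ x ∈ extra, x ∉ l) →
    l.foldl (fun r c => if c ∉ r1 then r ++ [c] else r) (r1 ++ extra)
    = l.foldl pvStep (r1 ++ extra) := by
  induction l with
  | nil => intro extra _ _ _; rfl
  | cons c l ih =>
    intro extra hnd halpha hdisj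
    have hcl : c ∈ pvAlpha := halpha c List.mem_cons_self
    have hce : c ∉ extra := fun h => (hdisj c h) List.mem_cons_self
    simp only [List.foldl_cons]
    by_cases h1 : c ∈ r1
    · have e1 : (if c ∉ r1 then r1 ++ extra ++ [c] else r1 ++ extra) = r1 ++ extra := by
        rw [if_neg (by simpa using h1)]
      have e2 : pvStep (r1 ++ extra) c = r1 ++ extra := by
        unfold pvStep
        rw [if_neg (by simp [hcl, h1])]
      rw [e1, e2]
      exact ih extra hnd.of_cons (fun x hx => halpha x (List.mem_cons_of_mem c hx))
        (fun x hx => fun hxl => hdisj x hx (List.mem_cons_of_mem c hxl))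
    · have hnotin : c ∉ r1 ++ extra := by
        intro h
        rcases List.mem_append.mp h with h | h
        · exact h1 h
        · exact hce h
      have e1 : (if c ∉ r1 then r1 ++ extra ++ [c] else r1 ++ extra) = r1 ++ (extra ++ [c]) := by
        rw [if_pos h1, List.append_assoc]
      have e2 : pvStep (r1 ++ extra) c = r1 ++ (extra ++ [c]) := by
        unfold pvStep
        rw [if_pos ⟨hcl, hnotin⟩, List.append_assoc]
      rw [e1, e2]
      exact ih (extra ++ [c]) hnd.of_cons (fun x hx => halpha x (List.mem_cons_of_mem c hx))
        (fun x hx => by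
          rcases List.mem_append.mp hx with h | h
          · exact fun hxl => hdisj x h (List.mem_cons_of_mem c hxl)
          · have hxc : x = c := by simpa using h
            subst hxc
            exact (List.nodup_cons.mp hnd).1)

lemma pvAlpha_nodup : pvAlpha.Nodup := by decide

lemma pvKeyed_eq (kw : List Char) : pvKeyedAlphabet kw = pvKeyedAlphabetB kw := by
  unfold pvKeyedAlphabet pvKeyedAlphabetB
  rw [List.foldl_append]
  have hB : (PySem.Chars.upper kw).foldl
      (fun out c => if c ∈ pvAlpha ∧ c ∉ out then out ++ [c] else out) ([] : List Char)
      = (PySem.Chars.upper kw).foldl pvStep [] := by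
    apply PySem.List.foldl_congr_mem
    intro acc x _
    rfl
  rw [hB]
  have hempty : ((PySem.Set.empty : PySem.Set Char), ([] : List Char))
      = (([] : List Char), ([] : List Char)) := rfl
  rw [hempty, pvKeyed_loop1]
  have h2 := pvKeyed_loop2 pvAlpha ((PySem.Chars.upper kw).foldl pvStep []) []
    pvAlpha_nodup (fun _ h => h) (by simp)
  simpa using h2

def pvVal (ka ia ct : List Char) (p : Int) (k : Nat) : Char :=
  PySem.List.pyGetD ka
    (PySem.Int.mod (pvLet2nB (PySem.List.pyGetD ct (k : Int) 'A')
      - pvLet2nB (PySem.List.pyGetD ia (PySem.Int.mod (k : Int) p) 'A')) 26) 'A'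

lemma pvFoldl_set_getElem? {α : Type} (G : Int → α) (idxs : List Int)
    (hpos : ∀ i ∈ idxs, 0 ≤ i) (out : List α) (k : Nat) :
    (idxs.foldl (fun o i => o.set i.toNat (G i)) out)[k]? =
    if (k : Int) ∈ idxs ∧ k < out.length then some (G (k : Int)) else out[k]? := by
  induction idxs generalizing out with
  | nil => simp
  | cons i rest ih =>
    have hi : 0 ≤ i := hpos i List.mem_cons_self
    simp only [List.foldl_cons]
    rw [ih (fun x hx => hpos x (List.mem_cons_of_mem i hx))]
    rw [List.length_set]
    by_cases hk : (k : Int) ∈ rest ∧ k < out.length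
    · rw [if_pos hk, if_pos ⟨List.mem_cons_of_mem i hk.1, hk.2⟩]
    · rw [if_neg hk, List.getElem?_set]
      by_cases hik : i.toNat = k
      · have hki : (k : Int) = i := by omega
        by_cases hlen : k < out.length
        · rw [if_pos hik, if_pos (by omega), if_pos ⟨by rw [hki]; exact List.mem_cons_self, hlen⟩, hki]
        · rw [if_pos hik, if_neg (by omega), if_neg (fun h => hlen h.2)]
          symm
          exact List.getElem?_eq_none (by omega)
      · rw [if_neg hik]
        have hki : (k : Int) ≠ i := fun h => hik (by omega)
        rw [if_neg (by
          rintro ⟨hmem, hlen⟩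
          rcases List.mem_cons.mp hmem with h | h
          · exact hki h
          · exact hk ⟨h, hlen⟩)]

lemma pvMod_le {k p : Int} (hk : 0 ≤ k) (hp : 0 < p) : k % p ≤ k := by
  by_cases h : k < p
  · rw [Int.emod_eq_of_lt hk h]
  · have h1 := Int.emod_lt_of_pos k hp
    omega

lemma pvMem_pyRange_mod {j p nI k : Int} (hj : 0 ≤ j) (hjp : j < p) (hk : 0 ≤ k) :
    k ∈ PySem.List.pyRange j nI p ↔ (PySem.Int.mod k p = j ∧ k < nI) := by
  rw [PySem.List.mem_pyRange_iff_of_pos (by omega)]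
  rw [PySem.Int.mod_eq_emod_of_pos (by omega)]
  have hd : p ∣ k - k % p := Dvd.intro (k / p) (by rw [Int.emod_def]; ring)
  have hb1 : 0 ≤ k % p := Int.emod_nonneg k (by omega)
  have hb2 : k % p < p := Int.emod_lt_of_pos k (by omega)
  constructor
  · rintro ⟨h1, h2, h3⟩
    refine ⟨?_, h2⟩
    have h5 : p ∣ (k - j) - (k - k % p) := dvd_sub h3 hd
    have h6 : (k - j) - (k - k % p) = k % p - j := by ring
    rw [h6] at h5
    have h7 : k % p - j = 0 := Int.eq_zero_of_abs_lt_dvd h5 (by rw [abs_lt]; omega)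
    omega
  · rintro ⟨h1, h2⟩
    rw [← h1]
    exact ⟨pvMod_le hk (by omega), h2, hd⟩

lemma pvOuter (ka ia ct : List Char) (p : Int) (hp : 1 ≤ p) :
    ∀ (t : Nat), (t : Int) ≤ min p (ct.length : Int) →
    (PySem.List.pyRange 0 (t : Int)).foldl
      (fun out j =>
        (PySem.List.pyRange j (ct.length : Int) p).foldl
          (fun out i =>
            out.set i.toNat (some (PySem.List.pyGetD ka
              (PySem.Int.mod (pvLet2nB (PySem.List.pyGetD ct i 'A')
                - pvLet2nB (PySem.List.pyGetD ia j 'A')) 26) 'A')))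
          out)
      (List.replicate ct.length none)
    = (List.range ct.length).map
        (fun (k : Nat) => if PySem.Int.mod (k : Int) p < (t : Int)
                  then some (pvVal ka ia ct p k) else none) := by
  intro t
  induction t with
  | zero =>
    intro _
    rw [Nat.cast_zero, PySem.List.pyRange_one_eq_nil le_rfl]
    simp only [List.foldl_nil]
    have h : ∀ k ∈ List.range ct.length,
        (if PySem.Int.mod (k : Int) p < (0 : Int) then some (pvVal ka ia ct p k) else none)
        = (none : Option Char) := by
      intro k _
      rw [if_neg (by have := PySem.Int.mod_nonneg (a := (k : Int)) (b := p) (by omega); omega)]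
    rw [List.map_congr_left h]
    simp
  | succ t ih =>
    intro ht
    have hcast : ((t + 1 : Nat) : Int) = (t : Int) + 1 := by push_cast; ring
    rw [hcast] at ht
    rcases le_min_iff.mp ht with ⟨h1, h2⟩
    have ht' : (t : Int) ≤ min p (ct.length : Int) := le_min (by omega) (by omega)
    rw [hcast, PySem.List.pyRange_one_succ_right (by positivity), List.foldl_append,
      ih ht']
    simp only [List.foldl_cons, List.foldl_nil]
    have hpos : ∀ i ∈ PySem.List.pyRange (t : Int) (ct.length : Int) p, 0 ≤ i := by
      intro i hi
      have := (PySem.List.mem_pyRange_iff_of_pos (by omega) i).mp hi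
      omega
    apply List.ext_getElem?
    intro k
    rw [pvFoldl_set_getElem? _ _ hpos _ k]
    have hlen : ((List.range ct.length).map
        (fun (k : Nat) => if PySem.Int.mod (k : Int) p < (t : Int)
                  then some (pvVal ka ia ct p k) else none)).length = ct.length := by
      simp
    rw [hlen]
    by_cases hk : k < ct.length
    · have hmem := pvMem_pyRange_mod (j := (t : Int)) (p := p) (nI := (ct.length : Int))
        (k := (k : Int)) (by positivity) (by omega) (by positivity)
      by_cases hmod : PySem.Int.mod (k : Int) p = (t : Int)
      · rw [if_pos ⟨hmem.mpr ⟨hmod, by exact_mod_cast hk⟩, hk⟩]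
        rw [List.getElem?_map, List.getElem?_range hk, Option.map_some]
        rw [if_pos (by omega)]
        unfold pvVal
        rw [hmod]
      · rw [if_neg (by rintro ⟨hm, _⟩; exact hmod (hmem.mp hm).1)]
        rw [List.getElem?_map, List.getElem?_map, List.getElem?_range hk, Option.map_some,
          Option.map_some]
        congr 1
        exact if_congr ⟨fun h => by omega, fun h => by omega⟩ rfl rfl
    · rw [if_neg (fun h => hk h.2)]
      rw [List.getElem?_eq_none (by simp; omega), List.getElem?_eq_none (by simp; omega)]

lemma pvB_filled (ka ia ct : List Char) (p : Int) (hp : 1 ≤ p) :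
    (PySem.List.pyRange 0 (min p (ct.length : Int))).foldl
      (fun out j =>
        (PySem.List.pyRange j (ct.length : Int) p).foldl
          (fun out i =>
            out.set i.toNat (some (PySem.List.pyGetD ka
              (PySem.Int.mod (pvLet2nB (PySem.List.pyGetD ct i 'A')
                - pvLet2nB (PySem.List.pyGetD ia j 'A')) 26) 'A')))
          out)
      (List.replicate ct.length none)
    = (List.range ct.length).map (fun (k : Nat) => some (pvVal ka ia ct p k)) := by
  have h0 : (0 : Int) ≤ min p (ct.length : Int) := le_min (by omega) (by positivity)
  have hcast : (((min p (ct.length : Int)).toNat : Int)) = min p (ct.length : Int) :=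
    Int.toNat_of_nonneg h0
  rw [← hcast, pvOuter ka ia ct p hp _ (le_of_eq hcast)]
  apply List.map_congr_left
  intro k hk
  have hk' : k < ct.length := List.mem_range.mp hk
  have hmlt : PySem.Int.mod (k : Int) p < p := PySem.Int.mod_lt (k : Int) (by omega)
  have hmle : PySem.Int.mod (k : Int) p ≤ (k : Int) := by
    rw [PySem.Int.mod_eq_emod_of_pos (by omega)]
    exact pvMod_le (by positivity) (by omega)
  rw [if_pos (by rw [hcast]; exact lt_min hmlt (by omega))]

lemma pvA_map (ka ia ct : List Char) (p : Int) :
    (PySem.List.enumerate ct).foldl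
      (fun (res : List Char) (pr : Int × Char) =>
        res ++ [PySem.List.pyGetD ka
          (PySem.Int.mod (pvLet2nB pr.2
            - pvLet2nB (PySem.List.pyGetD ia (PySem.Int.mod pr.1 p) 'A')) 26) 'A'])
      []
    = (List.range ct.length).map (fun (k : Nat) => pvVal ka ia ct p k) := by
  rw [PySem.List.foldl_append_singleton_eq_map, PySem.List.enumerate_eq_map_pyRange ct 'A',
    List.map_map]
  have hlen : PySem.List.len ct = (ct.length : Int) := by simp [pysem]
  rw [hlen, PySem.List.pyRange_zero_nat, List.map_map]
  simp only [List.nil_append]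
  rfl

-- ===== VERDICT (by name: the statement is the Claim_ definition above) =====
theorem quagmire_decrypt_spec : Claim_equal_quagmire_decrypt := by
  intro ciphertext key indicator period _ hpre
  unfold Spec_quagmire_decrypt
  simp only [quagmire_decrypt, quagmire_decrypt_alt, pvKeyed_eq, pvClean_eq, pvLet2n_eq]
  rw [pvA_map (pvKeyedAlphabetB key.toList) (pvKeyedAlphabetB indicator.toList)
    (pvCleanTextB ciphertext.toList) period]
  by_cases hp : 1 ≤ period
  · rw [pvB_filled (pvKeyedAlphabetB key.toList) (pvKeyedAlphabetB indicator.toList)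
      (pvCleanTextB ciphertext.toList) period hp]
    rw [List.map_map]
    rfl
  · have hct0 : pvCleanTextB ciphertext.toList = [] := by
      rcases hpre with h | h
      · exact h
      · exact absurd h.1 hp
    rw [hct0]
    rw [PySem.List.pyRange_one_eq_nil (by simpa using min_le_right period (0 : Int))]
    rfl
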